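-- pv_equiv track=rewrite | github.com/vaishnav1906/reflectra | backend/app/api/chat.py | limit_questions
-- ===== SOURCE A (Python) =====
-- def limit_questions(text: str) -> str:
--     seen = 0
--     output = []
--     for char in text:
--         if char == "?":
--             if seen == 0:
--                 output.append(char)
--                 seen += 1
--             else:
--                 output.append(".")
--         else:
--             output.append(char)
--     return "".join(output).strip()
-- ===== SOURCE B (Python) =====
-- def limit_questions(text: str) -> str:
--     idx = text.find("?")
--     if idx == -1:
--         return text.strip()
--     return (text[:idx + 1] + text[idx + 1:].replace("?", ".")).strip()
-- ===== Notes on version B (the rewrite author's own statement) =====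
-- stated objective: idiomatic
-- what changed: Replaces the per-character loop with a stateful seen-flag by one str.find for the first question mark, keeping the prefix through it and bulk-replacing the remaining question marks with dots via str.replace.
import Mathlib
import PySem

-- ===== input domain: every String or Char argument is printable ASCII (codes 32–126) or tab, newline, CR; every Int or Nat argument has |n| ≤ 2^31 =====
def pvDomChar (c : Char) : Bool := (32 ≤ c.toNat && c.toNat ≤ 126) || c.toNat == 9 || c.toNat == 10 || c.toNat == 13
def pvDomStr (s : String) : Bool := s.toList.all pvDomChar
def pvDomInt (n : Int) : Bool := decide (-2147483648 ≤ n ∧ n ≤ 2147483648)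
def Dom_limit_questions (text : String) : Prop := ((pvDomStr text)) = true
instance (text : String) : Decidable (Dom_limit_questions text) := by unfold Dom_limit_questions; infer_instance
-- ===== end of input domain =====

-- B keeps the prefix through the first '?' found by text.find and bulk-replaces '?' with '.' in the rest (idiomatic; A's per-character loop with a 'seen' flag is dropped).

-- ===== PORT A =====
def limit_questions (text : String) : String :=
  PySem.Str.strip (String.ofList
    (text.toList.foldl
      (fun (st : Nat × List Char) c =>
        if c = '?' then
          if st.1 = 0 then (st.1 + 1, st.2 ++ ['?'])
          else (st.1, st.2 ++ ['.'])
        else (st.1, st.2 ++ [c]))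
      (0, [])).2)

-- ===== PORT B =====
def limit_questions_alt (text : String) : String :=
  let idx := PySem.Str.find text "?"
  if idx = -1 then PySem.Str.strip text
  else
    PySem.Str.strip
      (PySem.Str.slice text none (some (idx + 1)) ++
        PySem.Str.replace (PySem.Str.slice text (some (idx + 1)) none) "?" ".")

-- ===== PRECONDITION & SPEC =====
def Spec_limit_questions (text : String) (out : String) : Prop := out = limit_questions_alt text
instance (text : String) (out : String) : Decidable (Spec_limit_questions text out) := by unfold Spec_limit_questions; infer_instance

-- ===== CLAIM (what is proved, stated in full; the proofs are below) =====
def Claim_equal_limit_questions : Prop := ∀ (text : String), Dom_limit_questions text → Spec_limit_questions text (limit_questions text)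

-- ===== LEMMAS AND PROOFS =====

/-- dot-for-question substitution on one character -/
def pvG (c : Char) : Char := if c = '?' then '.' else c

/-- what A's loop produces starting from seen = 0 -/
def pvProc0 : List Char → List Char
  | [] => []
  | c :: t => if c = '?' then '?' :: t.map pvG else c :: pvProc0 t

lemma pvFoldl_seen (l : List Char) (s : Nat) (acc : List Char) (hs : s ≠ 0) :
    l.foldl
      (fun (st : Nat × List Char) c =>
        if c = '?' then
          if st.1 = 0 then (st.1 + 1, st.2 ++ ['?'])
          else (st.1, st.2 ++ ['.'])
        else (st.1, st.2 ++ [c])) (s, acc) = (s, acc ++ l.map pvG) := by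
  induction l generalizing acc with
  | nil => simp
  | cons c t ih =>
    by_cases hc : c = '?'
    · simp [hc, hs, pvG, ih]
    · simp only [List.foldl_cons, if_neg hc]
      rw [ih]
      simp [pvG, hc]

lemma pvFoldl_zero (l : List Char) (acc : List Char) :
    (l.foldl
      (fun (st : Nat × List Char) c =>
        if c = '?' then
          if st.1 = 0 then (st.1 + 1, st.2 ++ ['?'])
          else (st.1, st.2 ++ ['.'])
        else (st.1, st.2 ++ [c])) (0, acc)).2 = acc ++ pvProc0 l := by
  induction l generalizing acc with
  | nil => simp [pvProc0]
  | cons c t ih =>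
    by_cases hc : c = '?'
    · simp [hc, pvProc0, pvFoldl_seen t 1 (acc ++ ['?']) (by omega)]
    · simp [hc, pvProc0, ih]

lemma pvA_eq (text : String) :
    limit_questions text = PySem.Str.strip (String.ofList (pvProc0 text.toList)) := by
  unfold limit_questions
  rw [pvFoldl_zero]
  simp

lemma pvProc0_no_q (l : List Char) (h : '?' ∉ l) : pvProc0 l = l := by
  induction l with
  | nil => rfl
  | cons c t ih =>
    simp only [List.mem_cons, not_or] at h
    have hc : ¬ c = '?' := fun e => h.1 e.symm
    simp [pvProc0, hc, ih h.2]

lemma pvProc0_split (a b : List Char) (ha : ∀ c ∈ a, c ≠ '?') :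
    pvProc0 (a ++ '?' :: b) = a ++ '?' :: b.map pvG := by
  induction a with
  | nil => simp [pvProc0]
  | cons c t ih =>
    have hc : c ≠ '?' := ha c (by simp)
    simp [pvProc0, hc, ih (fun x hx => ha x (by simp [hx]))]

lemma pvStrip_congr (x y : String) (h : x.toList = y.toList) :
    PySem.Str.strip x = PySem.Str.strip y := by
  rw [String.toList_inj.mp h]

lemma pvReplace_go_q (fuel : Nat) (l acc : List Char) (h : l.length ≤ fuel) :
    PySem.Chars.replace.go ['?'] ['.'] fuel l acc = acc.reverse ++ l.map pvG := by
  induction fuel generalizing l acc with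
  | zero =>
    have : l = [] := List.length_eq_zero_iff.mp (by omega)
    subst this; simp [PySem.Chars.replace.go]
  | succ n ih =>
    cases l with
    | nil => simp [PySem.Chars.replace.go]
    | cons c t =>
      by_cases hc : c = '?'
      · subst hc
        rw [PySem.Chars.replace.go]
        rw [if_pos (by simp [List.isPrefixOf])]
        simp only [List.length_cons, List.length_nil, List.drop_succ_cons, List.drop_zero,
          List.reverse_cons, List.reverse_nil, List.nil_append]
        rw [ih t _ (by simp at h; omega)]
        simp [pvG]
      · rw [PySem.Chars.replace.go]
        rw [if_neg (by simp [List.isPrefixOf]; exact fun h' => hc h'.symm)]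
        rw [ih t _ (by simp at h; omega)]
        simp [pvG, hc]

lemma pvReplace_q (l : List Char) :
    PySem.Chars.replace l ['?'] ['.'] = l.map pvG := by
  unfold PySem.Chars.replace
  rw [if_neg (by simp)]
  rw [pvReplace_go_q l.length l [] (le_refl _)]
  simp

-- ===== VERDICT (by name: the statement is the Claim_ definition above) =====
theorem limit_questions_spec : Claim_equal_limit_questions := by
  intro text _
  unfold Spec_limit_questions limit_questions_alt
  rw [pvA_eq]
  set l := text.toList with hl
  by_cases hmem : '?' ∈ l
  · -- '?' occurs: find gives the first index k
    have hinf : ['?'] <:+: l := by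
      obtain ⟨s, t, hst⟩ := List.append_of_mem hmem
      exact ⟨s, t, by simp [hst]⟩
    have hfind : PySem.Str.find text "?" = PySem.Chars.find l ['?'] := by
      rw [PySem.Str.find_eq]; rfl
    have hne : PySem.Chars.find l ['?'] ≠ -1 :=
      (PySem.Chars.find_ne_neg_one_iff _ _).mpr hinf
    have hnn : 0 ≤ PySem.Chars.find l ['?'] :=
      (PySem.Chars.find_nonneg_iff _ _).mpr hinf
    obtain ⟨hpre, hmin⟩ := PySem.Chars.find_spec hnn
    set k := (PySem.Chars.find l ['?']).toNat with hk
    have hdropk : l.drop k = '?' :: l.drop (k + 1) := by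
      obtain ⟨r, hr⟩ := hpre
      have hdd : l.drop (k + 1) = r := by
        have h1 : l.drop (k + 1) = (l.drop k).drop 1 := by
          rw [List.drop_drop]
        rw [h1, ← hr]
        simp
      rw [← hr, hdd]
      rfl
    have htake : ∀ c ∈ l.take k, c ≠ '?' := by
      intro c hc hcq
      subst hcq
      obtain ⟨i, hi, hgi⟩ := List.mem_iff_getElem.mp hc
      have hi' := hi
      simp only [List.length_take, lt_min_iff] at hi'
      obtain ⟨hik, hil⟩ := hi'
      refine hmin i hik ⟨l.drop (i + 1), ?_⟩
      rw [List.drop_eq_getElem_cons hil]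
      have : l[i] = '?' := by
        rw [← hgi]; exact (List.getElem_take).symm
      simp [this]
    rw [hfind, if_neg hne]
    apply pvStrip_congr
    have h1 : (0:Int) ≤ PySem.Chars.find l ['?'] + 1 := by omega
    have h2 : (PySem.Chars.find l ['?'] + 1).toNat = k + 1 := by omega
    have hsl1 : (PySem.Str.slice text none (some (PySem.Chars.find l ['?'] + 1))).toList
        = l.take (k + 1) := by
      rw [PySem.Str.toList_slice, PySem.Chars.slice_eq_listSlice,
        PySem.List.slice_to _ h1, h2]
    have hsl2 : (PySem.Str.slice text (some (PySem.Chars.find l ['?'] + 1)) none).toList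
        = l.drop (k + 1) := by
      rw [PySem.Str.toList_slice, PySem.Chars.slice_eq_listSlice,
        PySem.List.slice_from _ h1, h2]
    have htk1 : l.take (k + 1) = l.take k ++ ['?'] := by
      rw [List.take_add_one]
      have : l[k]? = some '?' := by
        have := congrArg (fun xs => xs[0]?) hdropk
        simpa [List.getElem?_drop] using this
      simp [this]
    have hsplit : pvProc0 l = l.take k ++ '?' :: (l.drop (k + 1)).map pvG := by
      conv_lhs => rw [← List.take_append_drop k l, hdropk]
      exact pvProc0_split _ _ htake
    rw [String.toList_append, hsl1, PySem.Str.toList_replace, hsl2]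
    simp only [String.toList_ofList]
    rw [hsplit, htk1]
    have : ("?" : String).toList = ['?'] := rfl
    rw [this]
    have : ("." : String).toList = ['.'] := rfl
    rw [this]
    rw [pvReplace_q]
    simp
  · -- no '?': find = -1, both sides strip the text unchanged
    have hfind : PySem.Str.find text "?" = -1 := by
      rw [PySem.Str.find_eq]
      refine (PySem.Chars.find_eq_neg_one_iff _ _).mpr ?_
      intro ⟨s, t, hst⟩
      refine hmem ?_
      rw [hl, ← hst]; simp
    rw [hfind, if_pos rfl]
    apply pvStrip_congr
    rw [pvProc0_no_q l hmem]
    simp only [String.toList_ofList]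
    exact hl
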